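-- pv_equiv track=rewrite | github.com/lizhi-001/yunke | experiments/run_structured_scenarios.py | allocate_job_budgets
-- ===== SOURCE A (Python) =====
-- from typing import Any, Dict, List, Sequence, Tuple
--
-- def allocate_job_budgets(total_jobs: int, slot_count: int) -> List[int]:
--     total_jobs = max(1, int(total_jobs))
--     slot_count = max(1, int(slot_count))
--     budgets = [1] * slot_count
--     extra = total_jobs - slot_count
--     idx = 0
--     while extra > 0:
--         budgets[idx % slot_count] += 1
--         extra -= 1
--         idx += 1
--     return budgets
-- ===== SOURCE B (Python) =====
-- def allocate_job_budgets(total_jobs, slot_count):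
--     total_jobs = max(1, int(total_jobs))
--     slot_count = max(1, int(slot_count))
--     extra = max(0, total_jobs - slot_count)
--     q, r = divmod(extra, slot_count)
--     return [2 + q] * r + [1 + q] * (slot_count - r)
-- ===== Notes on version B (the rewrite author's own statement) =====
-- stated objective: simpler
-- what changed: Replaces the per-job round-robin while loop with a closed form: divmod of the extra jobs gives each slot 1+extra//slot_count and the first extra%slot_count slots one more.
import Mathlib
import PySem

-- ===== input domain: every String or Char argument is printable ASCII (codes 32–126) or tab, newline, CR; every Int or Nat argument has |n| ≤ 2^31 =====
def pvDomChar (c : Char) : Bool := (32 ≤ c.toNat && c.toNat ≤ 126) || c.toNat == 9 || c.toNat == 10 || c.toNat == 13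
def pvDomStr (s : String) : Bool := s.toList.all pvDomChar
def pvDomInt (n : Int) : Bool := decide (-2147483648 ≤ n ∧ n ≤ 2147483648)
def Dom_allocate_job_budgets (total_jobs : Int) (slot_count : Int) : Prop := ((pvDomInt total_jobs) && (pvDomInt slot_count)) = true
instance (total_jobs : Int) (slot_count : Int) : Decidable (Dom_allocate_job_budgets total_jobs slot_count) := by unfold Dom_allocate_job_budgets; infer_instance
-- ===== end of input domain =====

-- B replaces A's per-job round-robin while loop by a closed-form divmod allocation (objective: simpler).


-- ===== PORT A =====
-- the while loop: while extra > 0: budgets[idx % slot_count] += 1; extra -= 1; idx += 1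
def allocLoop (budgets : List Int) (extra : Int) (idx : Int) (slot_count : Int) : List Int :=
  if extra > 0 then
    allocLoop
      (budgets.set ((idx % slot_count).toNat)
        (budgets.getD ((idx % slot_count).toNat) 0 + 1))
      (extra - 1) (idx + 1) slot_count
  else budgets
termination_by extra.toNat
decreasing_by omega

def allocate_job_budgets (total_jobs : Int) (slot_count : Int) : List Int :=
  let t := max 1 total_jobs
  let s := max 1 slot_count
  allocLoop (List.replicate s.toNat 1) (t - s) 0 s

-- ===== PORT B =====
def allocate_job_budgets_alt (total_jobs : Int) (slot_count : Int) : List Int :=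
  let t := max 1 total_jobs
  let s := max 1 slot_count
  let extra := max 0 (t - s)
  let q := PySem.Int.floordiv extra s
  let r := PySem.Int.mod extra s
  List.replicate r.toNat (2 + q) ++ List.replicate (s - r).toNat (1 + q)

-- ===== PRECONDITION & SPEC =====
def Spec_allocate_job_budgets (total_jobs : Int) (slot_count : Int) (out : List Int) : Prop := out = allocate_job_budgets_alt total_jobs slot_count
instance (total_jobs : Int) (slot_count : Int) (out : List Int) : Decidable (Spec_allocate_job_budgets total_jobs slot_count out) := by unfold Spec_allocate_job_budgets; infer_instance

-- ===== CLAIM (what is proved, stated in full; the proofs are below) =====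
def Claim_equal_allocate_job_budgets : Prop := ∀ (total_jobs : Int) (slot_count : Int), Dom_allocate_job_budgets total_jobs slot_count → Spec_allocate_job_budgets total_jobs slot_count (allocate_job_budgets total_jobs slot_count)

-- ===== LEMMAS AND PROOFS =====

-- the shape of the loop state after q full rounds plus r single steps
def mkState (s q r : Int) : List Int :=
  List.replicate r.toNat (2 + q) ++ List.replicate (s - r).toNat (1 + q)

lemma loop_closed : ∀ (e : Nat) (s q r : Int), 0 < s → 0 ≤ q → 0 ≤ r → r < s →
    allocLoop (mkState s q r) e (q * s + r) s
      = mkState s ((q * s + r + e) / s) ((q * s + r + e) % s) := by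
  intro e
  induction e with
  | zero =>
    intro s q r hs hq hr hrs
    rw [allocLoop]
    have hrw : q * s + r = r + s * q := by ring
    have hmod : (q * s + r) % s = r := by
      rw [hrw, Int.add_mul_emod_self_left, Int.emod_eq_of_lt hr hrs]
    have hdiv : (q * s + r) / s = q := by
      rw [hrw, Int.add_mul_ediv_left _ _ (by omega : s ≠ 0),
        Int.ediv_eq_zero_of_lt hr hrs, zero_add]
    simp only [Nat.cast_zero, add_zero, if_neg (by omega : ¬ ((0:Int) > 0)), hmod, hdiv]
  | succ e ih =>
    intro s q r hs hq hr hrs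
    rw [allocLoop]
    push_cast
    have hpos : ((e:Int) + 1) > 0 := by omega
    have hmod : (q * s + r) % s = r := by
      have : q * s + r = r + s * q := by ring
      rw [this, Int.add_mul_emod_self_left, Int.emod_eq_of_lt hr hrs]
    have hlen : (List.replicate r.toNat (2 + q)).length = r.toNat := by simp
    have hsr : (s - r).toNat = (s - r - 1).toNat + 1 := by omega
    have hsplit : mkState s q r
        = List.replicate r.toNat (2 + q) ++ (1 + q) :: List.replicate (s - r - 1).toNat (1 + q) := by
      rw [mkState, hsr, List.replicate_succ]
    have hget : (mkState s q r).getD r.toNat 0 = 1 + q := by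
      rw [hsplit, List.getD_eq_getElem?_getD, List.getElem?_append_right (by simp)]
      simp
    have hset : (mkState s q r).set r.toNat (1 + q + 1)
        = List.replicate r.toNat (2 + q) ++ (1 + q + 1) :: List.replicate (s - r - 1).toNat (1 + q) := by
      rw [hsplit, List.set_append]
      simp
    rw [if_pos hpos]
    have hminus : (e:Int) + 1 - 1 = ((e:Nat) : Int) := by ring
    rw [hmod, hget, hset, hminus]
    by_cases hcase : r + 1 < s
    · have hstate : List.replicate r.toNat (2 + q) ++ (1 + q + 1) :: List.replicate (s - r - 1).toNat (1 + q)
          = mkState s q (r + 1) := by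
        rw [mkState]
        have h1 : (r + 1).toNat = r.toNat + 1 := by omega
        have h2 : (s - (r + 1)).toNat = (s - r - 1).toNat := by omega
        rw [h1, h2, List.replicate_succ', List.append_assoc]
        have e1 : (1:Int) + q + 1 = 2 + q := by ring
        rw [e1]
        rfl
      have hidx : q * s + r + 1 = q * s + (r + 1) := by ring
      rw [hstate, hidx, ih s q (r + 1) hs hq (by omega) hcase]
      have harith : q * s + (r + 1) + (e:Int) = q * s + r + ((e:Int) + 1) := by ring
      rw [harith]
    · have hr1 : r + 1 = s := by omega
      have hstate : List.replicate r.toNat (2 + q) ++ (1 + q + 1) :: List.replicate (s - r - 1).toNat (1 + q)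
          = mkState s (q + 1) 0 := by
        rw [mkState]
        have h0 : (s - r - 1).toNat = 0 := by omega
        have h1 : ((0:Int)).toNat = 0 := by omega
        have h2 : (s - 0).toNat = r.toNat + 1 := by omega
        have e1 : (1:Int) + q + 1 = 2 + q := by ring
        have e2 : (1:Int) + (q + 1) = 2 + q := by ring
        rw [h0, h1, h2, List.replicate_succ']
        simp [e1, e2]
      have hidx : q * s + r + 1 = (q + 1) * s + 0 := by rw [← hr1]; ring
      rw [hstate, hidx, ih s (q + 1) 0 hs (by omega) le_rfl hs]
      have harith : (q + 1) * s + 0 + (e:Int) = q * s + r + ((e:Int) + 1) := by rw [← hr1]; ring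
      rw [harith]

-- ===== VERDICT (by name: the statement is the Claim_ definition above) =====
theorem allocate_job_budgets_spec : Claim_equal_allocate_job_budgets := by
  intro t s _
  unfold Spec_allocate_job_budgets allocate_job_budgets allocate_job_budgets_alt
  set T := max 1 t with hT
  set S := max 1 s with hS
  have hSpos : 0 < S := by omega
  by_cases hx : T - S > 0
  · have hmax : max 0 (T - S) = T - S := by omega
    have hfd : PySem.Int.floordiv (T - S) S = (T - S) / S :=
      PySem.Int.floordiv_eq_ediv_of_pos hSpos
    have hmd : PySem.Int.mod (T - S) S = (T - S) % S :=
      PySem.Int.mod_eq_emod_of_pos hSpos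
    have hinit : List.replicate S.toNat 1 = mkState S 0 0 := by
      rw [mkState]; norm_num
    have hcast : ((T - S).toNat : Int) = T - S := by omega
    have := loop_closed (T - S).toNat S 0 0 hSpos le_rfl le_rfl hSpos
    simp only [zero_mul, zero_add, hcast] at this
    simp only [hmax, hfd, hmd]
    rw [hinit, this, mkState]
  · have hstop : allocLoop (List.replicate S.toNat 1) (T - S) 0 S = List.replicate S.toNat 1 := by
      rw [allocLoop, if_neg (by omega)]
    have hmax : max 0 (T - S) = 0 := by omega
    have hfd : PySem.Int.floordiv 0 S = 0 := by
      rw [PySem.Int.floordiv_eq_ediv_of_pos hSpos]; simp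
    have hmd : PySem.Int.mod 0 S = 0 := by
      rw [PySem.Int.mod_eq_emod_of_pos hSpos]; simp
    simp only [hstop, hmax, hfd, hmd]
    norm_num
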